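-- pv_equiv track=rewrite | github.com/hghyhghy/Codechef-Coding-Ninja | Desktop/DSA/T4/7.py | non_repeating_character
-- ===== SOURCE A (Python) =====
-- def non_repeating_character(string):
--
--     non_repeating_chars=""
--     frequency={}
--
--     for char in string:
--
--         if char in frequency:
--
--             frequency[char] += 1
--
--         else:
--
--             frequency[char] = 1
--
--     for val,count in frequency.items():
--
--         if  count == 1:
--
--             non_repeating_chars += val
--
--     return non_repeating_chars
-- ===== SOURCE B (Python) =====
-- def non_repeating_character(string):
--     return "".join(c for c in string if string.count(c) == 1)
-- ===== Notes on version B (the rewrite author's own statement) =====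
-- stated objective: idiomatic
-- what changed: Replaced the two-pass frequency-dict build-then-scan with a single filtering comprehension that keeps each character whose total count in the string is exactly 1 (order agrees because count-1 characters occur once).
import Mathlib
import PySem

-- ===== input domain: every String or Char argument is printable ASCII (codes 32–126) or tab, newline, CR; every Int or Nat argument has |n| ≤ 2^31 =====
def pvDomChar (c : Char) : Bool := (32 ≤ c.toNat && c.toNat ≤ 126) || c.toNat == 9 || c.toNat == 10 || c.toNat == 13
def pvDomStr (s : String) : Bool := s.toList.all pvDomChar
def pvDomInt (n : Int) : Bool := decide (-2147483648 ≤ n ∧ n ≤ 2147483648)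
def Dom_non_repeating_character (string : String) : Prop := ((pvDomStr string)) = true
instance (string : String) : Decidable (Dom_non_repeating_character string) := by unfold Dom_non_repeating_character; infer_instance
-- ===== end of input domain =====

-- B replaces A's frequency-dict build-then-scan by one idiomatic filtering pass that rescans the
-- string per character (string.count(c) == 1); not faster, just shorter and table-free.

-- ===== PORT A =====
def non_repeating_character (string : String) : String :=
  let frequency := string.toList.foldl
    (fun d c => if d.contains c then d.insert c (d.getD c 0 + 1) else d.insert c 1)
    (PySem.Dict.empty : PySem.Dict Char Int)
  String.ofList (frequency.items.foldl
    (fun acc p => if p.2 == 1 then acc ++ [p.1] else acc) ([] : List Char))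

-- ===== PORT B =====
def non_repeating_character_alt (string : String) : String :=
  String.ofList (string.toList.filter (fun c => PySem.Chars.count string.toList [c] == 1))

-- ===== PRECONDITION & SPEC =====
def Spec_non_repeating_character (string : String) (out : String) : Prop := out = non_repeating_character_alt string
instance (string : String) (out : String) : Decidable (Spec_non_repeating_character string out) := by unfold Spec_non_repeating_character; infer_instance

-- ===== CLAIM (what is proved, stated in full; the proofs are below) =====
def Claim_equal_non_repeating_character : Prop := ∀ (string : String), Dom_non_repeating_character string → Spec_non_repeating_character string (non_repeating_character string)

-- ===== LEMMAS AND PROOFS =====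

-- Python str.count with a one-character needle counts occurrences of that character.
theorem count_go_singleton (c : Char) :
    ∀ (l : List Char) (fuel acc : Nat), l.length ≤ fuel →
      PySem.Chars.count.go [c] fuel l acc = acc + l.count c := by
  intro l
  induction l with
  | nil => intro fuel acc _; cases fuel <;> simp [PySem.Chars.count.go]
  | cons x t ih =>
      intro fuel acc h
      cases fuel with
      | zero => simp at h
      | succ n =>
          simp only [PySem.Chars.count.go]
          by_cases hx : c = x
          · subst hx
            simp only [List.isPrefixOf, List.count_cons]
            simp only [beq_self_eq_true, Bool.true_and, if_pos]
            simp only [List.length_cons, List.length_nil, List.drop_succ_cons, List.drop_zero]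
            rw [ih n (acc + 1) (by simpa using Nat.le_of_succ_le_succ h)]
            omega
          · have hpre : List.isPrefixOf [c] (x :: t) = false := by
              simp [List.isPrefixOf, hx]
            rw [hpre]
            simp only [Bool.false_eq_true, if_false]
            rw [ih n acc (by simpa using Nat.le_of_succ_le_succ h)]
            simp [List.count_cons]
            exact fun he => hx he.symm

theorem chars_count_singleton (l : List Char) (c : Char) :
    PySem.Chars.count l [c] = l.count c := by
  simp only [PySem.Chars.count, List.isEmpty_cons, Bool.false_eq_true, if_false]
  simpa using count_go_singleton c l l.length 0 (le_refl _)

theorem getD_zero_of_not_contains (d : PySem.Dict Char Int) (c : Char)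
    (h : d.contains c = false) : d.getD c 0 = 0 := by
  simp only [PySem.Dict.getD]
  rw [PySem.Dict.contains_eq_isSome_get?] at h
  cases hg : d.get? c
  · rfl
  · rw [hg] at h; simp at h

-- A's first loop builds exactly Counter(string).
theorem loopA_eq_counter (l : List Char) :
    l.foldl (fun d c => if d.contains c then d.insert c (d.getD c 0 + 1) else d.insert c 1)
      (PySem.Dict.empty : PySem.Dict Char Int) = PySem.Dict.counter l := by
  have hfun : (fun (d : PySem.Dict Char Int) c =>
      if d.contains c then d.insert c (d.getD c 0 + 1) else d.insert c 1)
      = (fun d c => d.insert c (d.getD c 0 + 1)) := by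
    funext d c
    by_cases h : d.contains c = true
    · simp [h]
    · rw [if_neg (by simp [h]), getD_zero_of_not_contains d c (by simpa using h), zero_add]
  rw [hfun, PySem.Dict.foldl_insert_getD_add_one_eq_counter]

-- Filtering the deduplicated list equals filtering the list itself when the
-- predicate only holds on elements occurring at most once.
theorem filter_ofList_of_count_le_one (p : Char → Bool) :
    ∀ (m : List Char), (∀ y, p y = true → m.count y ≤ 1) →
      (PySem.Set.ofList m).filter p = m.filter p := by
  intro m
  induction m using List.reverseRecOn with
  | nil => intro _; simp [PySem.Set.ofList, PySem.Set.empty]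
  | append_singleton l x ih =>
      intro h
      have hl : ∀ y, p y = true → l.count y ≤ 1 := by
        intro y hy
        have := h y hy
        rw [List.count_append] at this
        omega
      have hofl : PySem.Set.ofList (l ++ [x]) = PySem.Set.add (PySem.Set.ofList l) x := by
        simp [PySem.Set.ofList, List.foldl_append]
      rw [hofl, PySem.Set.add]
      by_cases hc : (PySem.Set.ofList l).contains x = true
      · have hxl : x ∈ l := by
          have : x ∈ PySem.Set.ofList l := by
            simpa [PySem.Set.contains, List.contains_eq_mem] using hc
          exact (PySem.Set.mem_ofList l x).mp this
        have hpx : p x = false := by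
          by_contra hb
          have hpx' : p x = true := by simpa using hb
          have := h x hpx'
          rw [List.count_append] at this
          have hpos : 0 < l.count x := List.count_pos_iff.mpr hxl
          simp at this
          omega
        rw [if_pos hc, List.filter_append, ih hl]
        simp [hpx]
      · rw [if_neg hc, List.filter_append, List.filter_append, ih hl]

theorem main_eq (l : List Char) :
    (PySem.Dict.counter l).items.foldl
      (fun acc p => if p.2 == 1 then acc ++ [p.1] else acc) ([] : List Char)
    = l.filter (fun c => PySem.Chars.count l [c] == 1) := by
  rw [PySem.Dict.items_counter, List.foldl_map]
  have := PySem.List.foldl_append_if (fun k : Char => ((l.count k : Int) == 1)) id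
    (PySem.Set.ofList l) []
  simp only [id] at this
  rw [show (fun (acc : List Char) (k : Char) =>
        if ((k, (l.count k : Int)).2 == 1) then acc ++ [(k, (l.count k : Int)).1] else acc)
      = (fun acc k => if ((l.count k : Int) == 1) then acc ++ [k] else acc) from rfl]
  rw [this]
  have hpred : (fun k : Char => ((l.count k : Int) == 1))
      = (fun c : Char => PySem.Chars.count l [c] == 1) := by
    funext k
    rw [chars_count_singleton]
    by_cases hk : l.count k = 1 <;> simp [hk]
  rw [hpred]
  simp only [List.nil_append, List.map_id]
  exact filter_ofList_of_count_le_one (fun c => PySem.Chars.count l [c] == 1) l (by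
    intro y hy
    simp only [chars_count_singleton] at hy
    simp at hy
    omega)

-- ===== VERDICT (by name: the statement is the Claim_ definition above) =====
theorem non_repeating_character_spec : Claim_equal_non_repeating_character := by
  intro s _
  unfold Spec_non_repeating_character non_repeating_character non_repeating_character_alt
  rw [loopA_eq_counter]
  exact congrArg String.ofList (main_eq s.toList)
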